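-- pv_equiv track=rewrite | github.com/KoByungJune/FalseDuplication | M_FGG.py | Annt2Dic
-- ===== SOURCE A (Python) =====
-- def Annt2Dic(AnnList):
--     AnnDic = {} # {Chr : data..}
--     for i in AnnList:
--         DT = i.split('\t')
--         Chr = DT[0].split('.')[0]
--         if Chr in AnnDic: AnnDic[Chr].append(i)
--         else: AnnDic[Chr] = [i]
--     return AnnDic
-- ===== SOURCE B (Python) =====
-- def Annt2Dic(AnnList):
--     # No accumulating dict: dedup the chromosome keys (first-occurrence order),
--     # then build each group by filtering the whole list for that key.
--     key = lambda i: i.split('\t')[0].split('.')[0]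
--     chroms = list(dict.fromkeys(map(key, AnnList)))
--     return {c: [i for i in AnnList if key(i) == c] for c in chroms}
-- ===== Notes on version B (the rewrite author's own statement) =====
-- stated objective: alternative
-- what changed: A accumulates groups in one pass over the lines, mutating a dict with an append-or-create membership branch; B never accumulates: it dedups the chromosome keys once and builds each group independently by filtering the whole list per key (nested scans instead of hash accumulation).
import Mathlib
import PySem

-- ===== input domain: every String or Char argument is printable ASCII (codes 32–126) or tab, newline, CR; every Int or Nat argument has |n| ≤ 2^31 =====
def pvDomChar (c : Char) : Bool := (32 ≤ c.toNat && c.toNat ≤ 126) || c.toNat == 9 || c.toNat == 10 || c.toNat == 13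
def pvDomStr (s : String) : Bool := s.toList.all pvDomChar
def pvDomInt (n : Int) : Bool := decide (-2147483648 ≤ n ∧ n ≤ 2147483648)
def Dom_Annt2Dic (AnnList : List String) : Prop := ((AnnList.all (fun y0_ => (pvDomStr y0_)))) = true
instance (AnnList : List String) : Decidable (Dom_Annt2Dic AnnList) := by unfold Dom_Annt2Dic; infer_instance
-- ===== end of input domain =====

-- B replaces A's single-pass dict accumulation (append-or-create branch) by: dedup the
-- chromosome keys once, then build each group independently by filtering the list per key.


-- ===== PORT A =====
-- i.split('\t')[0].split('.')[0]; split? with a nonempty separator is always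
-- `some` of a nonempty list, so `.getD []` / `.headD ""` never fire their defaults.
def annChr (i : String) : String :=
  ((PySem.Str.split? (((PySem.Str.split? i "\t").getD []).headD "") ".").getD []).headD ""

def Annt2Dic (AnnList : List String) : List (String × List String) :=
  (AnnList.foldl (fun AnnDic i =>
    let Chr := annChr i
    if AnnDic.contains Chr then AnnDic.modify Chr [] (fun l => l ++ [i])
    else AnnDic.insert Chr [i]) PySem.Dict.empty).items

-- ===== PORT B =====
def Annt2Dic_alt (AnnList : List String) : List (String × List String) :=
  -- chroms = list(dict.fromkeys(map(key, AnnList)))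
  let chroms := PySem.List.dedup (AnnList.map annChr)
  -- {c: [i for i in AnnList if key(i) == c] for c in chroms}
  (chroms.foldl (fun d c =>
    d.insert c (AnnList.filter (fun i => annChr i == c))) PySem.Dict.empty).items

-- ===== PRECONDITION & SPEC =====
def Spec_Annt2Dic (AnnList : List String) (out : List (String × List String)) : Prop := out = Annt2Dic_alt AnnList
instance (AnnList : List String) (out : List (String × List String)) : Decidable (Spec_Annt2Dic AnnList out) := by unfold Spec_Annt2Dic; infer_instance

-- ===== CLAIM =====
def Claim_equal_Annt2Dic : Prop := ∀ (AnnList : List String), Dom_Annt2Dic AnnList → Spec_Annt2Dic AnnList (Annt2Dic AnnList)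

-- ===== LEMMAS AND PROOFS =====

-- A's if/else step IS Dict.modify: when the key is absent, modify inserts f [] = [i].
theorem annStep_eq_modify (d : PySem.Dict String (List String)) (i : String) :
    (if d.contains (annChr i) then d.modify (annChr i) [] (fun l => l ++ [i])
     else d.insert (annChr i) [i])
      = d.modify (annChr i) [] (fun l => l ++ [i]) := by
  by_cases h : d.contains (annChr i) = true
  · simp [h]
  · simp only [Bool.not_eq_true] at h
    simp [h, PySem.Dict.modify, PySem.Dict.getD_of_not_contains _ _ h]

theorem annFold_eq (AnnList : List String) :
    AnnList.foldl (fun AnnDic i =>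
      let Chr := annChr i
      if AnnDic.contains Chr then AnnDic.modify Chr [] (fun l => l ++ [i])
      else AnnDic.insert Chr [i]) PySem.Dict.empty
    = AnnList.foldl (fun d i => d.modify (annChr i) [] (fun l => l ++ [i])) PySem.Dict.empty :=
  PySem.List.foldl_congr_mem _ _ _ _ (fun d i _ => annStep_eq_modify d i)

theorem Annt2Dic_spec : Claim_equal_Annt2Dic := by
  intro AnnList _
  unfold Spec_Annt2Dic Annt2Dic Annt2Dic_alt
  rw [annFold_eq]
  set ks := AnnList.map annChr with hks
  -- A's dict: keys are the distinct chromosomes in order, groups are filters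
  set dA := AnnList.foldl (fun d i => d.modify (annChr i) [] (fun l => l ++ [i]))
    PySem.Dict.empty with hdA
  have hndA : dA.keys.Nodup :=
    PySem.Dict.nodup_keys_foldl_modify_key AnnList annChr [] (fun _ i l => l ++ [i])
      PySem.Dict.empty (by simp [PySem.Dict.keys_empty])
  have hkA : dA.keys = PySem.Set.ofList ks := by
    rw [hdA, PySem.Dict.keys_foldl_modify_key]; rfl
  have hgA : ∀ c, dA.getD c [] = AnnList.filter (fun i => annChr i == c) := by
    intro c
    have h := PySem.Dict.getD_foldl_modify_append (AnnList.map (fun i => (annChr i, i)))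
      PySem.Dict.empty c
    rw [List.foldl_map] at h
    rw [hdA]
    simp only [List.filter_map, Function.comp_def, List.map_map] at h
    simpa using h
  -- B's dict comprehension inserts FRESH distinct keys, so its items list is a map
  have hB : (((PySem.List.dedup ks).foldl (fun d c =>
        d.insert c (AnnList.filter (fun i => annChr i == c)))
        PySem.Dict.empty) : PySem.Dict String (List String)).items
      = (PySem.List.dedup ks).map
          (fun c => (c, AnnList.filter (fun i => annChr i == c))) := by
    have := PySem.Dict.items_foldl_insert_fresh (PySem.List.dedup ks) (fun c => c)
      (fun c => AnnList.filter (fun i => annChr i == c)) PySem.Dict.empty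
      (fun a _ => PySem.Dict.contains_empty a)
      (by simp [PySem.List.nodup_dedup])
    simp at this; exact this
  rw [hB, PySem.Dict.items_eq_map_keys dA hndA [], hkA,
    (PySem.List.dedup_eq_ofList ks : PySem.List.dedup ks = PySem.Set.ofList ks)]
  exact List.map_congr_left (fun k _ => by rw [hgA k])
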